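-- pv_equiv track=rewrite | github.com/aouggad-web/afcfta-final-002 | backend/etl/news_aggregator.py | get_news_by_category
-- ===== SOURCE A (Python) =====
-- from typing import List, Dict, Optional
--
-- def get_news_by_category(articles: List[Dict]) -> Dict[str, List[Dict]]:
--     """Grouper les articles par catégorie"""
--     by_category = {}
--     for article in articles:
--         category = article.get("category", "Économie")
--         if category not in by_category:
--             by_category[category] = []
--         by_category[category].append(article)
--     return by_category
-- ===== SOURCE B (Python) =====
-- def get_news_by_category(articles):
--     """Grouper les articles par catégorie"""
--     key = lambda a: a.get("category", "Économie")
--     keys = []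
--     for a in articles:
--         c = key(a)
--         if c not in keys:
--             keys.append(c)
--     return {c: [a for a in articles if key(a) == c] for c in keys}
-- ===== Notes on version B (the rewrite author's own statement) =====
-- stated objective: alternative
-- what changed: Replaces A's single-pass scatter-into-dict with a two-phase plan: first collect the distinct category keys in order of first occurrence, then build the result as a dict comprehension that filters the article list once per key.
import Mathlib
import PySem

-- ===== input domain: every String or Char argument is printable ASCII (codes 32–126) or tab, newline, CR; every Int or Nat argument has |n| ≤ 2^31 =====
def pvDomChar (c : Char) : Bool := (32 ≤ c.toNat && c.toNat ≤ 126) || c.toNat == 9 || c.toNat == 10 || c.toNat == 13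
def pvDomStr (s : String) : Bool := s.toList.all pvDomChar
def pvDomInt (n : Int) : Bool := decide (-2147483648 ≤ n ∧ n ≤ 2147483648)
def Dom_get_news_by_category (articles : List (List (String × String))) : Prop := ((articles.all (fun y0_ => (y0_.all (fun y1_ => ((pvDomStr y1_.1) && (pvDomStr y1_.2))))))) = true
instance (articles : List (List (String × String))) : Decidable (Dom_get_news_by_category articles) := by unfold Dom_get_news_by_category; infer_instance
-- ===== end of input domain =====

-- B replaces A's single-pass scatter-into-dict grouping with a two-phase plan
-- (collect distinct category keys in first-occurrence order, then one filter
-- per key); alternative decomposition, same return value.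

-- ===== PORT A =====
-- A: one pass, scatter each article into a dict keyed by its category.
def get_news_by_category (articles : List (List (String × String))) : List (String × List (List (String × String))) :=
  (articles.foldl
    (fun by_category article =>
      let category := (PySem.Dict.mk article).getD "category" "Économie"
      let by_category :=
        if by_category.contains category then by_category
        else by_category.insert category ([] : List (List (String × String)))
      by_category.modify category [] (fun l => l ++ [article]))
    (PySem.Dict.empty : PySem.Dict String (List (List (String × String))))).items

-- ===== PORT B =====
-- B: distinct keys in first-occurrence order, then filter the list once per key.
def pvKeyB (a : List (String × String)) : String :=
  (PySem.Dict.mk a).getD "category" "Économie"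

def get_news_by_category_alt (articles : List (List (String × String))) : List (String × List (List (String × String))) :=
  let keys := articles.foldl
    (fun ks a => let c := pvKeyB a; if ks.contains c then ks else ks ++ [c]) ([] : List String)
  keys.map (fun c => (c, articles.filter (fun a => pvKeyB a == c)))

-- ===== PRECONDITION & SPEC =====
def Spec_get_news_by_category (articles : List (List (String × String))) (out : List (String × List (List (String × String)))) : Prop := out = get_news_by_category_alt articles
instance (articles : List (List (String × String))) (out : List (String × List (List (String × String)))) : Decidable (Spec_get_news_by_category articles out) := by unfold Spec_get_news_by_category; infer_instance

-- ===== CLAIM (what is proved, stated in full; the proofs are below) =====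
def Claim_equal_get_news_by_category : Prop := ∀ (articles : List (List (String × String))), Dom_get_news_by_category articles → Spec_get_news_by_category articles (get_news_by_category articles)

-- ===== LEMMAS AND PROOFS =====

-- A's loop body ('if missing, insert []; then append') is exactly Dict.modify.
theorem pv_step_eq_modify (d : PySem.Dict String (List (List (String × String))))
    (a : List (String × String)) :
    (let c := (PySem.Dict.mk a).getD "category" "Économie"
     let d' := if d.contains c then d else d.insert c ([] : List (List (String × String)))
     d'.modify c [] (fun l => l ++ [a]))
    = d.modify (pvKeyB a) [] (fun l => l ++ [a]) := by
  simp only [pvKeyB]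
  by_cases h : d.contains ((PySem.Dict.mk a).getD "category" "Économie")
  · simp [h]
  · rw [Bool.not_eq_true] at h
    simp only [h, Bool.false_eq_true, if_false, PySem.Dict.modify]
    rw [PySem.Dict.getD_insert_self, PySem.Dict.insert_insert_self,
      PySem.Dict.getD_of_not_contains _ _ h]

-- A's whole fold, rewritten as the pure modify-fold keyed by pvKeyB.
theorem pv_fold_eq (articles : List (List (String × String))) :
    (articles.foldl
      (fun by_category article =>
        let category := (PySem.Dict.mk article).getD "category" "Économie"
        let by_category :=
          if by_category.contains category then by_category
          else by_category.insert category ([] : List (List (String × String)))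
        by_category.modify category [] (fun l => l ++ [article]))
      (PySem.Dict.empty : PySem.Dict String (List (List (String × String)))))
    = articles.foldl (fun d a => d.modify (pvKeyB a) [] (fun l => l ++ [a])) PySem.Dict.empty := by
  congr 1
  funext d a
  exact pv_step_eq_modify d a

-- B's key-collecting fold is Set.ofList of the mapped keys.
theorem pv_keysB_eq (articles : List (List (String × String))) :
    articles.foldl
      (fun ks a => let c := pvKeyB a; if ks.contains c then ks else ks ++ [c]) ([] : List String)
    = PySem.Set.ofList (articles.map pvKeyB) := by
  rw [PySem.Set.ofList_eq_foldl, List.foldl_map]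
  rfl

theorem get_news_by_category_eq_alt (articles : List (List (String × String))) :
    get_news_by_category articles = get_news_by_category_alt articles := by
  unfold get_news_by_category get_news_by_category_alt
  rw [pv_fold_eq, pv_keysB_eq]
  set d := articles.foldl (fun d a => d.modify (pvKeyB a) [] (fun l => l ++ [a]))
    (PySem.Dict.empty : PySem.Dict String (List (List (String × String)))) with hd
  have hnd : d.keys.Nodup := by
    rw [hd]
    exact PySem.Dict.nodup_keys_foldl_modify_key articles pvKeyB []
      (fun _ a l => l ++ [a]) _ PySem.Dict.nodup_keys_empty
  have hkeys : d.keys = PySem.Set.ofList (articles.map pvKeyB) := by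
    rw [hd, PySem.Dict.keys_foldl_modify_key articles pvKeyB [] (fun _ a l => l ++ [a])]
    simp [PySem.Dict.keys_empty, PySem.Set.update, PySem.Set.ofList_eq_foldl]
  have hgetD : ∀ c : String, d.getD c [] = articles.filter (fun a => pvKeyB a == c) := by
    intro c
    have := PySem.Dict.getD_foldl_modify_append (articles.map (fun a => (pvKeyB a, a)))
      (PySem.Dict.empty : PySem.Dict String (List (List (String × String)))) c
    rw [List.foldl_map] at this
    simp only [PySem.Dict.getD_empty, List.nil_append] at this
    rw [hd]
    rw [show (fun (d : PySem.Dict String (List (List (String × String)))) a =>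
        d.modify (pvKeyB a) [] (fun l => l ++ [a]))
      = (fun d a => d.modify (pvKeyB a, a).1 [] (fun x => x ++ [(pvKeyB a, a).2])) from rfl]
    rw [this, List.filter_map, List.map_map]
    simp [Function.comp_def]
  rw [PySem.Dict.items_eq_map_keys d hnd [], hkeys]
  exact List.map_congr_left (fun c _ => by rw [hgetD c])

-- ===== VERDICT (by name: the statement is the Claim_ definition above) =====
theorem get_news_by_category_spec : Claim_equal_get_news_by_category := by
  intro articles _
  exact get_news_by_category_eq_alt articles
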